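-- pv_equiv track=rewrite | github.com/lukkelele/hacking | penetration-tools/bruteforce/allPasswordLengths.py | sixCharacters
-- ===== SOURCE A (Python) =====
-- def oneCharacter(dictionary):
--     variations = []
--
--     for i in dictionary:
--         variations.append(i)
--     return variations
--
-- def twoCharacters(dictionary):
--     old = oneCharacter(dictionary)
--     variations = []
--     for k in dictionary:
--         for i in dictionary:
--             combo = str(k+i)
--             variations.append(combo)
--     return variations+old
--
-- def threeCharacters(dictionary):
--     old = twoCharacters(dictionary)
--     variations = []
--     for k in dictionary:
--         for l in dictionary:
--             for i in dictionary:
--                 combo = str(k+l+i)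
--                 variations.append(combo)
--     return variations+old
--
-- def fourCharacters(dictionary):
--     old = threeCharacters(dictionary)
--     variations = []
--     for k in dictionary:
--         for d in dictionary:
--             for l in dictionary:
--                 for i in dictionary:
--                     combo = str(k+d+l+i)
--                     variations.append(combo)
--     return variations+old
--
-- def fiveCharacters(dictionary):
--     old = fourCharacters(dictionary)
--     variations = []
--     for k in dictionary:
--         for z in dictionary:
--             for d in dictionary:
--                 for l in dictionary:
--                     for i in dictionary:
--                         combo = str(k+z+d+l+i)
--                         variations.append(combo)
--     return variations+old
--
-- def sixCharacters(dictionary):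
--     old = fiveCharacters(dictionary)
--     variations = []
--     for k in dictionary:
--         for z in dictionary:
--             for d in dictionary:
--                 for l in dictionary:
--                     for i in dictionary:
--                         for y in dictionary:
--                             combo = str(k+z+d+l+i+y)
--                             variations.append(combo)
--     return variations+old
-- ===== SOURCE B (Python) =====
-- def sixCharacters(dictionary):
--     # Incremental layer extension: each level-L word is a level-(L-1) word plus one
--     # symbol, new levels prepended so output runs length 6 down to 1.
--     level = list(dictionary)
--     out = list(dictionary)
--     for _ in range(5):
--         level = [w + x for w in level for x in dictionary]
--         out = level + out
--     return out
-- ===== Notes on version B (the rewrite author's own statement) =====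
-- stated objective: alternative
-- what changed: Replaced the six recursive helpers with hand-unrolled nested loops by a single accumulator loop that builds each length level incrementally by extending the previous level's words with one symbol, prepending each new level.
import Mathlib
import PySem

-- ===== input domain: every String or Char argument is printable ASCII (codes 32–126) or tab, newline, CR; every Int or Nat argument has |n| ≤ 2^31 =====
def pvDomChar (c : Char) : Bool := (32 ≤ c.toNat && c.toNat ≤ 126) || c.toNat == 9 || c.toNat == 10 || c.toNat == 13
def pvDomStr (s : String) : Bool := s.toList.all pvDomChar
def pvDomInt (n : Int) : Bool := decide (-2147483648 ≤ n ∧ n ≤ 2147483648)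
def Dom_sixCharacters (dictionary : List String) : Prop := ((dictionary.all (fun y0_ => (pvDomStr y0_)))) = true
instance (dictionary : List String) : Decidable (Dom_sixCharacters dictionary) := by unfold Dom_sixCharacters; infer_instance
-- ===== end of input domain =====

-- B replaces the six recursive nested-loop helpers with one accumulator loop extending the previous length level (objective: alternative).
-- ===== PORT A =====
def oneCharacter (dictionary : List String) : List String :=
  dictionary.foldl (fun variations i => variations ++ [i]) []

def twoCharacters (dictionary : List String) : List String :=
  let old := oneCharacter dictionary
  let variations := dictionary.foldl (fun a k =>
    dictionary.foldl (fun a i => a ++ [k ++ i]) a) []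
  variations ++ old

def threeCharacters (dictionary : List String) : List String :=
  let old := twoCharacters dictionary
  let variations := dictionary.foldl (fun a k =>
    dictionary.foldl (fun a l =>
      dictionary.foldl (fun a i => a ++ [k ++ l ++ i]) a) a) []
  variations ++ old

def fourCharacters (dictionary : List String) : List String :=
  let old := threeCharacters dictionary
  let variations := dictionary.foldl (fun a k =>
    dictionary.foldl (fun a d =>
      dictionary.foldl (fun a l =>
        dictionary.foldl (fun a i => a ++ [k ++ d ++ l ++ i]) a) a) a) []
  variations ++ old

def fiveCharacters (dictionary : List String) : List String :=
  let old := fourCharacters dictionary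
  let variations := dictionary.foldl (fun a k =>
    dictionary.foldl (fun a z =>
      dictionary.foldl (fun a d =>
        dictionary.foldl (fun a l =>
          dictionary.foldl (fun a i => a ++ [k ++ z ++ d ++ l ++ i]) a) a) a) a) []
  variations ++ old

def sixCharacters (dictionary : List String) : List String :=
  let old := fiveCharacters dictionary
  let variations := dictionary.foldl (fun a k =>
    dictionary.foldl (fun a z =>
      dictionary.foldl (fun a d =>
        dictionary.foldl (fun a l =>
          dictionary.foldl (fun a i =>
            dictionary.foldl (fun a y => a ++ [k ++ z ++ d ++ l ++ i ++ y]) a) a) a) a) a) []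
  variations ++ old

-- ===== PORT B =====
-- single pass: state = (current level, accumulated output); each iteration extends
-- every word of the current level by one dictionary symbol and prepends the new level
def sixCharacters_alt (dictionary : List String) : List String :=
  ((List.range 5).foldl
    (fun (p : List String × List String) _ =>
      let level := p.1.flatMap (fun w => dictionary.map (fun x => w ++ x))
      (level, level ++ p.2))
    (dictionary, dictionary)).2

-- ===== PRECONDITION & SPEC =====
def Spec_sixCharacters (dictionary : List String) (out : List String) : Prop := out = sixCharacters_alt dictionary
instance (dictionary : List String) (out : List String) : Decidable (Spec_sixCharacters dictionary out) := by unfold Spec_sixCharacters; infer_instance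

-- ===== CLAIM (what is proved, stated in full; the proofs are below) =====
def Claim_equal_sixCharacters : Prop := ∀ (dictionary : List String), Dom_sixCharacters dictionary → Spec_sixCharacters dictionary (sixCharacters dictionary)

-- ===== LEMMAS AND PROOFS =====
theorem foldl_app {α β : Type} (f : α → List β) (d : List α) :
    ∀ acc, d.foldl (fun a x => a ++ f x) acc = acc ++ d.flatMap f := by
  induction d with
  | nil => simp
  | cons h t ih => intro acc; simp [List.foldl_cons, ih]

theorem flatMap_single {α β : Type} (l : List α) (f : α → β) :
    l.flatMap (fun x => [f x]) = l.map f := by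
  induction l with
  | nil => rfl
  | cons h t ih => simp [List.flatMap_cons, ih]

-- ===== VERDICT (by name: the statement is the Claim_ definition above) =====
theorem sixCharacters_spec : Claim_equal_sixCharacters := by
  intro d _
  unfold Spec_sixCharacters
  simp only [sixCharacters, fiveCharacters, fourCharacters, threeCharacters, twoCharacters,
    oneCharacter, sixCharacters_alt, foldl_app, List.nil_append]
  simp only [show List.range 5 = [0, 1, 2, 3, 4] from rfl, List.foldl_cons, List.foldl_nil]
  simp [List.flatMap_assoc, List.flatMap_map, flatMap_single, String.append_assoc]
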